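-- pv_equiv track=rewrite | github.com/jitenkr2030/IndiGLM | IndiGLM/indiglm/advanced_reasoning.py | _apply_deductive_logic
-- ===== SOURCE A (Python) =====
-- from typing import Dict, List, Optional, Union, AsyncGenerator, Tuple, Any
--
-- def _apply_deductive_logic(premises: List[str], facts: Dict[str, Any]) -> str:
--     """Apply deductive logic to reach conclusion"""
--     # Simplified deductive reasoning
--     conclusion = "Based on the given premises and facts, "
--
--     # Analyze premises for patterns
--     if any("agriculture" in p.lower() for p in premises):
--         conclusion += "agricultural outcomes depend on multiple factors including weather, soil quality, and market conditions."
--     elif any("healthcare" in p.lower() for p in premises):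
--         conclusion += "healthcare solutions must consider accessibility, affordability, and cultural appropriateness."
--     elif any("education" in p.lower() for p in premises):
--         conclusion += "educational outcomes depend on infrastructure, teacher quality, and student engagement."
--     else:
--         conclusion += "the conclusion follows logically from the given premises and available facts."
--
--     return conclusion
-- ===== SOURCE B (Python) =====
-- # Premise-major single pass: one loop over the premises computing the minimum
-- # priority rank of any matched keyword, then one indexed lookup of the suffix
-- # (A instead scans all premises once per keyword in an if/elif chain).
-- _SUFFIXES = [
--     "agricultural outcomes depend on multiple factors including weather, soil quality, and market conditions.",
--     "healthcare solutions must consider accessibility, affordability, and cultural appropriateness.",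
--     "educational outcomes depend on infrastructure, teacher quality, and student engagement.",
--     "the conclusion follows logically from the given premises and available facts.",
-- ]
--
-- def _rank(low):
--     if "agriculture" in low:
--         return 0
--     if "healthcare" in low:
--         return 1
--     if "education" in low:
--         return 2
--     return 3
--
-- def _apply_deductive_logic(premises, facts):
--     best = 3
--     for p in premises:
--         best = min(best, _rank(p.lower()))
--     return "Based on the given premises and facts, " + _SUFFIXES[best]
-- ===== Notes on version B (the rewrite author's own statement) =====
-- stated objective: alternative
-- what changed: Inverts the traversal: a single pass over the premises maintains the minimum keyword-priority rank seen (a numeric accumulator), then the suffix is picked by indexing a table, instead of A's if/elif chain that rescans all premises once per keyword.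
import Mathlib
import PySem

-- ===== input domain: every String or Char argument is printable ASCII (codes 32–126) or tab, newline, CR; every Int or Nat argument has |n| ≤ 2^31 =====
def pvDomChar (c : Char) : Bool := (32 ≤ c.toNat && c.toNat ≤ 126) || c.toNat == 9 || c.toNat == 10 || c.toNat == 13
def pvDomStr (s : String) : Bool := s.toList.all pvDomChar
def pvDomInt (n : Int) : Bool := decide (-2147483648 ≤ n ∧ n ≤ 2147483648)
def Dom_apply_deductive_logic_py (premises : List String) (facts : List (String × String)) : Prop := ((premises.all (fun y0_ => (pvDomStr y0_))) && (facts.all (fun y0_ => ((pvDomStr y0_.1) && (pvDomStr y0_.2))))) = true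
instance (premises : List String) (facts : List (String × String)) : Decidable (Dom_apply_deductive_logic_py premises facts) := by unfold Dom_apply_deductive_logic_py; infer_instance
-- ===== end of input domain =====

-- B changes the traversal (one pass over premises with a min-rank accumulator, then a table lookup) — alternative decomposition, same cost.

-- ===== PORT A =====
-- literal transliteration of A's if/elif chain (each branch rescans the premises)
def apply_deductive_logic_py (premises : List String) (facts : List (String × String)) : String :=
  let conclusion := "Based on the given premises and facts, "
  if premises.any (fun p => PySem.Str.isIn "agriculture" (PySem.Str.lower p)) then
    conclusion ++ "agricultural outcomes depend on multiple factors including weather, soil quality, and market conditions."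
  else if premises.any (fun p => PySem.Str.isIn "healthcare" (PySem.Str.lower p)) then
    conclusion ++ "healthcare solutions must consider accessibility, affordability, and cultural appropriateness."
  else if premises.any (fun p => PySem.Str.isIn "education" (PySem.Str.lower p)) then
    conclusion ++ "educational outcomes depend on infrastructure, teacher quality, and student engagement."
  else
    conclusion ++ "the conclusion follows logically from the given premises and available facts."

-- ===== PORT B =====
-- single pass over premises, keeping the minimum keyword-priority rank; suffix picked by indexing
def pvSuffixes : List String :=
  ["agricultural outcomes depend on multiple factors including weather, soil quality, and market conditions.",
   "healthcare solutions must consider accessibility, affordability, and cultural appropriateness.",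
   "educational outcomes depend on infrastructure, teacher quality, and student engagement.",
   "the conclusion follows logically from the given premises and available facts."]

def pvRank (low : String) : Nat :=
  if PySem.Str.isIn "agriculture" low then 0
  else if PySem.Str.isIn "healthcare" low then 1
  else if PySem.Str.isIn "education" low then 2
  else 3

def apply_deductive_logic_py_alt (premises : List String) (facts : List (String × String)) : String :=
  let best := premises.foldl (fun b p => min b (pvRank (PySem.Str.lower p))) 3
  "Based on the given premises and facts, " ++ pvSuffixes.getD best ""

-- ===== PRECONDITION & SPEC =====
def Spec_apply_deductive_logic_py (premises : List String) (facts : List (String × String)) (out : String) : Prop := out = apply_deductive_logic_py_alt premises facts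
instance (premises : List String) (facts : List (String × String)) (out : String) : Decidable (Spec_apply_deductive_logic_py premises facts out) := by unfold Spec_apply_deductive_logic_py; infer_instance

-- ===== CLAIM (what is proved, stated in full; the proofs are below) =====
def Claim_equal_apply_deductive_logic_py : Prop := ∀ (premises : List String) (facts : List (String × String)), Dom_apply_deductive_logic_py premises facts → Spec_apply_deductive_logic_py premises facts (apply_deductive_logic_py premises facts)

-- ===== LEMMAS AND PROOFS =====

-- the value A's keyword-major chain selects, as a rank
def pvChainRank (ps : List String) : Nat :=
  if ps.any (fun p => PySem.Str.isIn "agriculture" (PySem.Str.lower p)) then 0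
  else if ps.any (fun p => PySem.Str.isIn "healthcare" (PySem.Str.lower p)) then 1
  else if ps.any (fun p => PySem.Str.isIn "education" (PySem.Str.lower p)) then 2
  else 3

theorem pvRank_chain_cons (p : String) (ps : List String) :
    min (pvRank (PySem.Str.lower p)) (pvChainRank ps) = pvChainRank (p :: ps) := by
  cases ha : PySem.Str.isIn "agriculture" (PySem.Str.lower p) <;>
  cases hh : PySem.Str.isIn "healthcare" (PySem.Str.lower p) <;>
  cases he : PySem.Str.isIn "education" (PySem.Str.lower p) <;>
  cases ha' : ps.any (fun q => PySem.Str.isIn "agriculture" (PySem.Str.lower q)) <;>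
  cases hh' : ps.any (fun q => PySem.Str.isIn "healthcare" (PySem.Str.lower q)) <;>
  cases he' : ps.any (fun q => PySem.Str.isIn "education" (PySem.Str.lower q)) <;>
  simp only [pvRank, pvChainRank, List.any_cons, ha, hh, he, ha', hh', he',
    Bool.true_or, Bool.false_or, Bool.or_true, Bool.or_false, if_true, if_false] <;> rfl

theorem pvFold_min_eq (ps : List String) :
    ∀ b : Nat, b ≤ 3 → ps.foldl (fun b p => min b (pvRank (PySem.Str.lower p))) b = min b (pvChainRank ps) := by
  induction ps with
  | nil =>
      intro b hb
      simp [pvChainRank]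
      omega
  | cons p ps ih =>
      intro b hb
      have h1 : min b (pvRank (PySem.Str.lower p)) ≤ 3 := by
        have : pvRank (PySem.Str.lower p) ≤ 3 := by unfold pvRank; split_ifs <;> omega
        omega
      simp only [List.foldl_cons]
      rw [ih _ h1, Nat.min_assoc, pvRank_chain_cons]

theorem pvChainRank_le (ps : List String) : pvChainRank ps ≤ 3 := by
  unfold pvChainRank; split_ifs <;> omega

-- ===== VERDICT (by name: the statement is the Claim_ definition above) =====
theorem apply_deductive_logic_py_spec : Claim_equal_apply_deductive_logic_py := by
  intro premises facts _
  unfold Spec_apply_deductive_logic_py apply_deductive_logic_py_alt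
  rw [pvFold_min_eq premises 3 (by omega)]
  have hle := pvChainRank_le premises
  have hmin : min 3 (pvChainRank premises) = pvChainRank premises := by omega
  rw [hmin]
  unfold apply_deductive_logic_py pvChainRank
  cases h1 : premises.any (fun p => PySem.Str.isIn "agriculture" (PySem.Str.lower p)) <;>
  cases h2 : premises.any (fun p => PySem.Str.isIn "healthcare" (PySem.Str.lower p)) <;>
  cases h3 : premises.any (fun p => PySem.Str.isIn "education" (PySem.Str.lower p)) <;>
  simp only [h1, h2, h3, if_true, if_false] <;> rfl
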